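-- pv_equiv track=rewrite | github.com/chris-data-pro/python-algorithm | algorithm/union_find.py | canonical
-- ===== SOURCE A (Python) =====
-- def canonical(shape):
--     # shapes = [[(a * i, b * j) for i, j in shape] for a, b in ((1, 1), (1, -1), (-1, 1), (-1, -1))]
--     # shapes += [[(j, i) for i, j in shape] for shape in shapes]
--     shape = [(i, j) for i, j in shape]
--     shape_cw_90 = [(j, -i) for i, j in shape]
--     shape_cw_180 = [(-i, -j) for i, j in shape]
--     shape_cw_270 = [(-j, i) for i, j in shape]
--     rotate = [shape, shape_cw_90, shape_cw_180, shape_cw_270]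
--
--     flip = [(-i, j) for i, j in shape]  # up side down flip
--     flip_cw_90 = [(j, i) for i, j in shape]
--     flip_cw_180 = [(i, -j) for i, j in shape]
--     flip_cw_270 = [(-j, -i) for i, j in shape]
--     flip = [flip, flip_cw_90, flip_cw_180, flip_cw_270]
--
--     shapes = rotate + flip
--
--     return shapes
-- ===== SOURCE B (Python) =====
-- def rot(pts):
--     return [(j, -i) for i, j in pts]
--
--
-- def canonical(shape):
--     base = [(i, j) for i, j in shape]
--     rotate = [base]
--     for _ in range(3):
--         rotate.append(rot(rotate[-1]))
--     flip0 = [(-i, j) for i, j in base]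
--     flips = [flip0]
--     for _ in range(3):
--         flips.append(rot(flips[-1]))
--     return rotate + flips
-- ===== Notes on version B (the rewrite author's own statement) =====
-- stated objective: simpler
-- what changed: B derives the eight images by iterating one 90-degree rotation helper from the base and from the flipped base, instead of eight independent closed-form comprehensions.
import Mathlib
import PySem

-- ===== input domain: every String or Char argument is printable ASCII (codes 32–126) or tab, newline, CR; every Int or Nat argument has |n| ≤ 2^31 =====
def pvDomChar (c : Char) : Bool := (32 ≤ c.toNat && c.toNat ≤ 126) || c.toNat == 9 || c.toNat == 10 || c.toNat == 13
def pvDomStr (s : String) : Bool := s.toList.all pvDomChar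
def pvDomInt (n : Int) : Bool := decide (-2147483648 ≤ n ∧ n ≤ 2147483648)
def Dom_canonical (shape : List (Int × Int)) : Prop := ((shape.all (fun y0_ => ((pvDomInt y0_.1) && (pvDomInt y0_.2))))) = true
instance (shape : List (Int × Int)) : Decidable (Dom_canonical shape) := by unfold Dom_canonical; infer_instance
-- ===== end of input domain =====

-- ===== PORT A =====
-- A: eight independent closed-form comprehensions.
def canonical (shape : List (Int × Int)) : List (List (Int × Int)) :=
  let shape' := shape.map (fun p => (p.1, p.2))
  let shape_cw_90 := shape'.map (fun p => (p.2, -p.1))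
  let shape_cw_180 := shape'.map (fun p => (-p.1, -p.2))
  let shape_cw_270 := shape'.map (fun p => (-p.2, p.1))
  let rotate := [shape', shape_cw_90, shape_cw_180, shape_cw_270]
  let flip := shape'.map (fun p => (-p.1, p.2))
  let flip_cw_90 := shape'.map (fun p => (p.2, p.1))
  let flip_cw_180 := shape'.map (fun p => (p.1, -p.2))
  let flip_cw_270 := shape'.map (fun p => (-p.2, -p.1))
  rotate ++ [flip, flip_cw_90, flip_cw_180, flip_cw_270]

-- ===== PORT B =====
-- B: one 90° rotation helper iterated from the base and from the flipped base.
def rotB (pts : List (Int × Int)) : List (Int × Int) :=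
  pts.map (fun p => (p.2, -p.1))

def canonical_alt (shape : List (Int × Int)) : List (List (Int × Int)) :=
  let base := shape.map (fun p => (p.1, p.2))
  let rotate := (List.range 3).foldl (fun acc _ => acc ++ [rotB (acc.getLastD [])]) [base]
  let flip0 := base.map (fun p => (-p.1, p.2))
  let flips := (List.range 3).foldl (fun acc _ => acc ++ [rotB (acc.getLastD [])]) [flip0]
  rotate ++ flips

-- ===== PRECONDITION & SPEC =====
def Spec_canonical (shape : List (Int × Int)) (out : List (List (Int × Int))) : Prop := out = canonical_alt shape
instance (shape : List (Int × Int)) (out : List (List (Int × Int))) : Decidable (Spec_canonical shape out) := by unfold Spec_canonical; infer_instance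

-- ===== CLAIM (what is proved, stated in full; the proofs are below) =====
def Claim_equal_canonical : Prop := ∀ (shape : List (Int × Int)), Dom_canonical shape → Spec_canonical shape (canonical shape)

-- ===== LEMMAS AND PROOFS =====

-- ===== VERDICT (by name: the statement is the Claim_ definition above) =====
theorem canonical_spec : Claim_equal_canonical := by
  intro shape _
  show canonical shape = canonical_alt shape
  simp [canonical, canonical_alt, rotB, List.range_succ, List.map_map, Function.comp]
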